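-- pv_equiv track=rewrite | github.com/leeyang1991/Drought_Legacy | Main_flow.py | __split_999999
-- ===== SOURCE A (Python) =====
-- def __split_999999(selected_indx):
--     selected_indx_ = []
--     selected_indx_s = []
--     for i in selected_indx:
--         if i > 9999:
--             if len(selected_indx_) > 0:
--                 selected_indx_s.append(selected_indx_)
--             selected_indx_ = []
--             continue
--         else:
--             selected_indx_.append(i)
--     if len(selected_indx_s) == 0:
--         return None
--     return selected_indx_s[0]
--     pass
-- ===== SOURCE B (Python) =====
-- from itertools import groupby
--
-- def __split_999999(selected_indx):
--     runs = [list(g) for _, g in groupby(selected_indx, key=lambda x: x > 9999)]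
--     for run, nxt in zip(runs, runs[1:]):
--         if run[0] <= 9999:
--             return run
--     return None
-- ===== Notes on version B (the rewrite author's own statement) =====
-- stated objective: idiomatic
-- what changed: Replaced the manual accumulate-and-flush loop by itertools.groupby: split the input into maximal runs keyed by value > 9999, then return the first run of small values that has a successor run (i.e. was terminated by a >9999 value), None otherwise.
import Mathlib
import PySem

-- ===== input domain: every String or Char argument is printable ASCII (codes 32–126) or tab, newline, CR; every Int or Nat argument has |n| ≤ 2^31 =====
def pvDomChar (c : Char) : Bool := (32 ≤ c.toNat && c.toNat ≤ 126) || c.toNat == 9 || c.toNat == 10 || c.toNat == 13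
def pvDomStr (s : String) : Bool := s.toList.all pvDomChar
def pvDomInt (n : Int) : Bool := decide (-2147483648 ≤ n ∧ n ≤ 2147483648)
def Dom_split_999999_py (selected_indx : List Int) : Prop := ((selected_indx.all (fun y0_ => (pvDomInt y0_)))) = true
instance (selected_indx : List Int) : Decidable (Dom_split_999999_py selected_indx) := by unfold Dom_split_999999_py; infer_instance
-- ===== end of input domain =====

-- B replaces A's accumulate-and-flush loop by a groupby decomposition (maximal runs keyed by >9999,
-- then pick the first small run that has a successor run); objective: idiomatic, same O(n) cost.


-- ===== PORT A =====
-- literal port of A's loop: state (selected_indx_, selected_indx_s)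
def splitStepA (st : List Int × List (List Int)) (i : Int) : List Int × List (List Int) :=
  if i > 9999 then
    (if st.1.length > 0 then ([], st.2 ++ [st.1]) else ([], st.2))
  else (st.1 ++ [i], st.2)

def split_999999_py (selected_indx : List Int) : Option (List Int) :=
  let st := selected_indx.foldl splitStepA ([], [])
  if st.2.length = 0 then none else PySem.List.pyGet? st.2 0

-- ===== PORT B =====
-- itertools.groupby(selected_indx, key = fun x => x > 9999): maximal runs of equal key
def pyGroupRuns (l : List Int) : List (List Int) :=
  match l with
  | [] => []
  | x :: xs =>
      (x :: xs.takeWhile (fun y => decide (y > 9999) == decide (x > 9999)))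
        :: pyGroupRuns (xs.dropWhile (fun y => decide (y > 9999) == decide (x > 9999)))
termination_by l.length
decreasing_by
  simpa using Nat.lt_succ_of_le (List.length_dropWhile_le _ _)

-- the 'for run, nxt in zip(runs, runs[1:])' loop: first run with a successor whose head is ≤ 9999
def pickRun (runs : List (List Int)) : Option (List Int) :=
  match runs with
  | [] => none
  | [_] => none
  | g :: h :: t => if (g.headI) ≤ 9999 then some g else pickRun (h :: t)

def split_999999_py_alt (selected_indx : List Int) : Option (List Int) :=
  pickRun (pyGroupRuns selected_indx)

-- ===== PRECONDITION & SPEC =====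
def Spec_split_999999_py (selected_indx : List Int) (out : Option (List Int)) : Prop := out = split_999999_py_alt selected_indx
instance (selected_indx : List Int) (out : Option (List Int)) : Decidable (Spec_split_999999_py selected_indx out) := by unfold Spec_split_999999_py; infer_instance

-- ===== CLAIM (what is proved, stated in full; the proofs are below) =====
def Claim_equal_split_999999_py : Prop := ∀ (selected_indx : List Int), Dom_split_999999_py selected_indx → Spec_split_999999_py selected_indx (split_999999_py selected_indx)

-- ===== LEMMAS AND PROOFS =====

-- head of a dropWhile result falsifies the predicate
theorem dropWhile_head_false {α : Type} (p : α → Bool) :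
    ∀ (l : List α) (a : α) (as : List α), l.dropWhile p = a :: as → p a = false := by
  intro l
  induction l with
  | nil => intro a as h; simp [List.dropWhile] at h
  | cons x xs ih =>
    intro a as h
    by_cases hx : p x
    · rw [List.dropWhile_cons_of_pos hx] at h; exact ih _ _ h
    · rw [List.dropWhile_cons_of_neg hx] at h
      cases h
      simpa using hx

-- common reference function: A's loop as structural recursion on the remaining input
def F (cur : List Int) : List Int → Option (List Int)
  | [] => none
  | x :: xs => if x > 9999 then (if cur = [] then F [] xs else some cur) else F (cur ++ [x]) xs

-- A's accumulated runs list decomposes as a prefix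
theorem foldA_snd_append (l : List Int) (cur : List Int) (s : List (List Int)) :
    (l.foldl splitStepA (cur, s)).2 = s ++ (l.foldl splitStepA (cur, [])).2 := by
  induction l generalizing cur s with
  | nil => simp
  | cons x xs ih =>
    simp only [List.foldl_cons, splitStepA]
    by_cases hx : x > 9999 <;> simp [hx]
    · by_cases hc : cur.length > 0
      · simp only [hc, if_pos]
        rw [ih [] (s ++ [cur]), ih [] [cur]]; simp
      · simp only [hc, if_false]
        exact ih [] s
    · exact ih (cur ++ [x]) s

theorem foldA_head_eq_F (l : List Int) (cur : List Int) :
    ((l.foldl splitStepA (cur, [])).2).head? = F cur l := by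
  induction l generalizing cur with
  | nil => simp [F]
  | cons x xs ih =>
    simp only [List.foldl_cons, splitStepA, F]
    by_cases hx : x > 9999 <;> simp [hx]
    · by_cases hc : cur = []
      · simp [hc, ih]
      · have : cur.length > 0 := by cases cur <;> simp_all
        simp [hc, this, foldA_snd_append xs [] [cur]]
    · exact ih (cur ++ [x])

theorem portA_eq_F (l : List Int) : split_999999_py l = F [] l := by
  rw [← foldA_head_eq_F l []]
  simp only [split_999999_py]
  rcases h : (l.foldl splitStepA ([], [])).2 with _ | ⟨g, gs⟩ <;>
    simp [PySem.List.pyGet?, PySem.List.pyIdx?]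

-- skipping a block of large values
theorem F_skip_big (t : List Int) (d : List Int) (ht : ∀ y ∈ t, y > 9999) :
    F [] (t ++ d) = F [] d := by
  induction t with
  | nil => rfl
  | cons y ys ih =>
    have hy : y > 9999 := ht y (by simp)
    simp only [List.cons_append, F, if_pos hy]
    exact ih (fun z hz => ht z (by simp [hz]))

-- absorbing a block of small values into the accumulator
theorem F_absorb_small (t : List Int) (cur : List Int) (d : List Int)
    (ht : ∀ y ∈ t, ¬ y > 9999) : F cur (t ++ d) = F (cur ++ t) d := by
  induction t generalizing cur with
  | nil => simp
  | cons y ys ih =>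
    have hy : ¬ y > 9999 := ht y (by simp)
    simp only [List.cons_append, F, if_neg hy]
    rw [ih (cur ++ [y]) (fun z hz => ht z (by simp [hz]))]
    simp

theorem F_eq_pick_aux (n : ℕ) : ∀ l : List Int, l.length ≤ n → F [] l = pickRun (pyGroupRuns l) := by
  induction n with
  | zero =>
    intro l hl
    have : l = [] := List.length_eq_zero_iff.mp (Nat.le_zero.mp hl)
    simp [this, F, pyGroupRuns, pickRun]
  | succ n ih =>
    intro l hl
    cases l with
    | nil => simp [F, pyGroupRuns, pickRun]
    | cons x xs =>
      set p : Int → Bool := fun y => decide (y > 9999) == decide (x > 9999) with hp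
      have hsplit : xs = xs.takeWhile p ++ xs.dropWhile p := (List.takeWhile_append_dropWhile).symm
      have hdlen : (xs.dropWhile p).length ≤ n := by
        have h1 : (xs.dropWhile p).length ≤ xs.length := List.length_dropWhile_le p xs
        have h2 : xs.length + 1 ≤ n + 1 := by simpa using hl
        omega
      rw [pyGroupRuns]
      by_cases hx : x > 9999
      · -- leading big run: F skips it, pickRun skips the run
        have htw : ∀ y ∈ xs.takeWhile p, y > 9999 := by
          intro y hy
          have := List.mem_takeWhile_imp hy
          simp [hp, hx] at this
          exact this
        have hF : F [] (x :: xs) = F [] (xs.dropWhile p) := by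
          rw [F, if_pos hx, if_pos rfl]
          conv_lhs => rw [hsplit]
          exact F_skip_big _ _ htw
        rw [hF, ih _ hdlen]
        rcases hg : pyGroupRuns (xs.dropWhile p) with _ | ⟨g, gs⟩
        · -- dropWhile is empty precisely when its groups are empty
          have hd : xs.dropWhile p = [] := by
            cases hd : xs.dropWhile p with
            | nil => rfl
            | cons a as => rw [hd, pyGroupRuns] at hg; exact absurd hg (by simp)
          simp [hd, pyGroupRuns, pickRun] at hg ⊢
        · simp [pickRun, List.headI, hx]
      · -- leading small run: F absorbs it; the run terminates iff dropWhile nonempty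
        have htw : ∀ y ∈ xs.takeWhile p, ¬ y > 9999 := by
          intro y hy
          have := List.mem_takeWhile_imp hy
          simp [hp, hx] at this
          omega
        have hF : F [] (x :: xs) = F (x :: xs.takeWhile p) (xs.dropWhile p) := by
          rw [F, if_neg hx]
          conv_lhs => rw [hsplit]
          have := F_absorb_small (xs.takeWhile p) [x] (xs.dropWhile p) htw
          simpa using this
        rw [hF]
        cases hd : xs.dropWhile p with
        | nil => simp [F, pyGroupRuns, pickRun]
        | cons a as =>
          have ha : a > 9999 := by
            have := dropWhile_head_false p xs a as hd
            simp [hp, hx] at this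
            omega
          rw [F]
          have hbig : a > 9999 := ha
          rw [if_pos hbig, if_neg (by simp)]
          rw [pyGroupRuns]
          have hx' : x ≤ 9999 := by omega
          simp [pickRun, List.headI, hp, hx, hx']

theorem portB_eq_F (l : List Int) : F [] l = split_999999_py_alt l := by
  simpa [split_999999_py_alt] using F_eq_pick_aux l.length l le_rfl

-- ===== VERDICT (by name: the statement is the Claim_ definition above) =====
theorem split_999999_py_spec : Claim_equal_split_999999_py := by
  intro l _
  show split_999999_py l = split_999999_py_alt l
  rw [portA_eq_F, portB_eq_F]
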